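-- pv_equiv track=rewrite | github.com/Heoster/jarvis-2.0-enterprise | core/codeex_personality.py | _analyze_user_preferences
-- ===== SOURCE A (Python) =====
-- from typing import Dict, List, Optional
--
-- def _analyze_user_preferences(history: List[Dict]) -> Dict[str, bool]:
--     """Analyze user preferences from interaction history"""
--     preferences = {
--         'prefers_concise': False,
--         'prefers_detailed': False,
--         'likes_examples': False,
--         'formal_tone': False
--     }
--
--     # Simple analysis based on user queries
--     for interaction in history[-10:]:  # Last 10 interactions
--         query = interaction.get('query', '').lower()
--
--         if any(word in query for word in ['brief', 'short', 'quick', 'tldr']):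
--             preferences['prefers_concise'] = True
--
--         if any(word in query for word in ['detail', 'explain', 'elaborate', 'more']):
--             preferences['prefers_detailed'] = True
--
--         if any(word in query for word in ['example', 'show me', 'demonstrate']):
--             preferences['likes_examples'] = True
--
--         if any(word in query for word in ['please', 'could you', 'would you']):
--             preferences['formal_tone'] = True
--
--     return preferences
-- ===== SOURCE B (Python) =====
-- from typing import Dict, List
--
--
-- def _analyze_user_preferences(history: List[Dict]) -> Dict[str, bool]:
--     """Analyze user preferences from interaction history"""
--     # One combined lowered text of the last 10 queries; '\n' (absent from every
--     # keyword) separates queries so no keyword can match across a boundary.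
--     combined = "\n".join(
--         interaction.get('query', '').lower() for interaction in history[-10:]
--     )
--     return {
--         'prefers_concise': any(w in combined for w in ['brief', 'short', 'quick', 'tldr']),
--         'prefers_detailed': any(w in combined for w in ['detail', 'explain', 'elaborate', 'more']),
--         'likes_examples': any(w in combined for w in ['example', 'show me', 'demonstrate']),
--         'formal_tone': any(w in combined for w in ['please', 'could you', 'would you']),
--     }
-- ===== Notes on version B (the rewrite author's own statement) =====
-- stated objective: simpler
-- what changed: Replaces the per-interaction loop that OR-accumulates four dict flags with building one combined lowered text of the last 10 queries (joined by '\n', a character absent from every keyword, so matches cannot cross query boundaries) and computing each flag as a single any(word in combined) scan.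
import Mathlib
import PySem

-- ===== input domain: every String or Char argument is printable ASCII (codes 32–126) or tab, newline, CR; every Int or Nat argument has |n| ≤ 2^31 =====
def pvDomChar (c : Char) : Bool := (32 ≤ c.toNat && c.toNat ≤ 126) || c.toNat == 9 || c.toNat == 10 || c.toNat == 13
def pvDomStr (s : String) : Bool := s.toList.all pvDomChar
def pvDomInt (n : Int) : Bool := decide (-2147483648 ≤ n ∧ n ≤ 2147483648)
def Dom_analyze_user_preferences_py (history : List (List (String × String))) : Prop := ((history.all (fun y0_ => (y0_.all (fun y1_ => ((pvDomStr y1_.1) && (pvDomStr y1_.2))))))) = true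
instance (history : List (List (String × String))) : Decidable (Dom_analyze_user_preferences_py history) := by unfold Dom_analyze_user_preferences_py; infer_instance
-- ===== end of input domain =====

-- B builds one '\n'-joined lowered text of the last 10 queries and scans it once per
-- keyword group, replacing A's per-interaction loop that OR-accumulates dict flags (simpler).

-- ===== PORT A =====
def pvConciseWords : List String := ["brief", "short", "quick", "tldr"]
def pvDetailedWords : List String := ["detail", "explain", "elaborate", "more"]
def pvExampleWords : List String := ["example", "show me", "demonstrate"]
def pvFormalWords : List String := ["please", "could you", "would you"]

def pvStepA (prefs : PySem.Dict String Bool) (interaction : List (String × String)) :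
    PySem.Dict String Bool :=
  let query := PySem.Str.lower ((PySem.Dict.mk interaction).getD "query" "")
  let prefs := if pvConciseWords.any (fun w => PySem.Str.isIn w query) then
      prefs.insert "prefers_concise" true else prefs
  let prefs := if pvDetailedWords.any (fun w => PySem.Str.isIn w query) then
      prefs.insert "prefers_detailed" true else prefs
  let prefs := if pvExampleWords.any (fun w => PySem.Str.isIn w query) then
      prefs.insert "likes_examples" true else prefs
  let prefs := if pvFormalWords.any (fun w => PySem.Str.isIn w query) then
      prefs.insert "formal_tone" true else prefs
  prefs

def analyze_user_preferences_py (history : List (List (String × String))) : List (String × Bool) :=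
  let preferences : PySem.Dict String Bool :=
    PySem.Dict.mk [("prefers_concise", false), ("prefers_detailed", false),
                   ("likes_examples", false), ("formal_tone", false)]
  ((PySem.List.slice history (some (-10)) none).foldl pvStepA preferences).items

-- ===== PORT B =====
def analyze_user_preferences_py_alt (history : List (List (String × String))) : List (String × Bool) :=
  let combined := PySem.Str.join "\n"
    ((PySem.List.slice history (some (-10)) none).map
      (fun interaction => PySem.Str.lower ((PySem.Dict.mk interaction).getD "query" "")))
  [("prefers_concise", pvConciseWords.any (fun w => PySem.Str.isIn w combined)),
   ("prefers_detailed", pvDetailedWords.any (fun w => PySem.Str.isIn w combined)),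
   ("likes_examples", pvExampleWords.any (fun w => PySem.Str.isIn w combined)),
   ("formal_tone", pvFormalWords.any (fun w => PySem.Str.isIn w combined))]

-- ===== PRECONDITION & SPEC =====
def Spec_analyze_user_preferences_py (history : List (List (String × String))) (out : List (String × Bool)) : Prop := out = analyze_user_preferences_py_alt history
instance (history : List (List (String × String))) (out : List (String × Bool)) : Decidable (Spec_analyze_user_preferences_py history out) := by unfold Spec_analyze_user_preferences_py; infer_instance

-- ===== CLAIM (what is proved, stated in full; the proofs are below) =====
def Claim_equal_analyze_user_preferences_py : Prop := ∀ (history : List (List (String × String))), Dom_analyze_user_preferences_py history → Spec_analyze_user_preferences_py history (analyze_user_preferences_py history)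

-- ===== LEMMAS AND PROOFS =====

-- a keyword cannot straddle a separator character it does not contain
theorem pv_infix_sep {α : Type} {c : α} {w a b : List α} (hc : c ∉ w) :
    w <:+: a ++ c :: b ↔ w <:+: a ∨ w <:+: b := by
  constructor
  · rintro ⟨s, t, h⟩
    have hlen := congrArg List.length h
    simp at hlen
    by_cases h1 : s.length + w.length ≤ a.length
    · left
      have hp : s ++ w <+: a :=
        List.prefix_of_prefix_length_le ⟨t, by simpa using h⟩
          (List.prefix_append a (c :: b)) (by simp; omega)
      exact (List.suffix_append s w).isInfix.trans hp.isInfix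
    · by_cases h2 : a.length < s.length
      · right
        have hs : w ++ t <:+ b :=
          List.suffix_of_suffix_length_le ⟨s, by simpa using h⟩
            ⟨a ++ [c], by simp⟩ (by simp; omega)
        exact (List.prefix_append w t).isInfix.trans hs.isInfix
      · exfalso
        apply hc
        have hidx : (s ++ w ++ t)[a.length]? = some c := by
          rw [h, List.getElem?_append_right (le_refl a.length)]
          simp
        rw [List.append_assoc, List.getElem?_append_right (by omega : s.length ≤ a.length),
          List.getElem?_append_left (by omega : a.length - s.length < w.length)] at hidx
        exact List.mem_of_getElem? hidx
  · rintro (⟨s, t, rfl⟩ | ⟨s, t, rfl⟩)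
    · exact ⟨s, t ++ c :: b, by simp⟩
    · exact ⟨a ++ c :: s, t, by simp⟩

-- a newline-free, nonempty keyword is in the '\n'-join iff it is in one of the parts
theorem pv_infix_join {c : Char} {w : List Char} (hc : c ∉ w) (hw : w ≠ [])
    (qs : List (List Char)) :
    w <:+: PySem.Chars.join [c] qs ↔ ∃ q ∈ qs, w <:+: q := by
  induction qs with
  | nil => simp [PySem.Chars.join_nil, List.infix_nil, hw]
  | cons q rest ih =>
    cases rest with
    | nil => rw [PySem.Chars.join_singleton]; simp
    | cons r rs =>
      rw [PySem.Chars.join_cons_cons, List.append_assoc, List.singleton_append,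
        pv_infix_sep hc, ih]
      simp

-- the lowered query A and B both extract from an interaction
def pvQ (i : List (String × String)) : String :=
  PySem.Str.lower ((PySem.Dict.mk i).getD "query" "")

-- one step of A's loop on the literal 4-key dict
theorem pv_stepA_mk (i : List (String × String)) (a b c d : Bool) :
    pvStepA (PySem.Dict.mk [("prefers_concise", a), ("prefers_detailed", b),
        ("likes_examples", c), ("formal_tone", d)]) i =
      PySem.Dict.mk
        [("prefers_concise", a || pvConciseWords.any (fun w => PySem.Str.isIn w (pvQ i))),
         ("prefers_detailed", b || pvDetailedWords.any (fun w => PySem.Str.isIn w (pvQ i))),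
         ("likes_examples", c || pvExampleWords.any (fun w => PySem.Str.isIn w (pvQ i))),
         ("formal_tone", d || pvFormalWords.any (fun w => PySem.Str.isIn w (pvQ i)))] := by
  unfold pvStepA pvQ
  simp only []
  split_ifs <;> simp_all [PySem.Dict.insert]

-- the loop invariant of A's fold over the literal 4-key dict
theorem pv_foldA (l : List (List (String × String))) (a b c d : Bool) :
    (l.foldl pvStepA (PySem.Dict.mk [("prefers_concise", a), ("prefers_detailed", b),
        ("likes_examples", c), ("formal_tone", d)])).items =
      [("prefers_concise", a || l.any (fun i => pvConciseWords.any (fun w => PySem.Str.isIn w (pvQ i)))),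
       ("prefers_detailed", b || l.any (fun i => pvDetailedWords.any (fun w => PySem.Str.isIn w (pvQ i)))),
       ("likes_examples", c || l.any (fun i => pvExampleWords.any (fun w => PySem.Str.isIn w (pvQ i)))),
       ("formal_tone", d || l.any (fun i => pvFormalWords.any (fun w => PySem.Str.isIn w (pvQ i))))] := by
  induction l generalizing a b c d with
  | nil => simp
  | cons i l ih =>
    rw [List.foldl_cons, pv_stepA_mk, ih]
    simp [Bool.or_assoc]

-- a group flag on the combined text equals the any-over-queries flag
theorem pv_group_eq (words : List String)
    (hws : ∀ w ∈ words, ('\n' ∉ w.toList ∧ w.toList ≠ []))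
    (qs : List String) :
    words.any (fun w => PySem.Str.isIn w (PySem.Str.join "\n" qs)) =
      qs.any (fun q => words.any (fun w => PySem.Str.isIn w q)) := by
  apply Bool.eq_iff_iff.mpr
  simp only [List.any_eq_true]
  have hnl : ("\n" : String).toList = ['\n'] := rfl
  constructor
  · rintro ⟨w, hwmem, hin⟩
    rw [PySem.Str.isIn_iff_infix, PySem.Str.toList_join, hnl,
      pv_infix_join (hws w hwmem).1 (hws w hwmem).2] at hin
    obtain ⟨ql, hql, hinf⟩ := hin
    obtain ⟨q, hq, rfl⟩ := List.mem_map.mp hql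
    exact ⟨q, hq, w, hwmem, (PySem.Str.isIn_iff_infix _ _).mpr hinf⟩
  · rintro ⟨q, hq, w, hwmem, hin⟩
    refine ⟨w, hwmem, ?_⟩
    rw [PySem.Str.isIn_iff_infix, PySem.Str.toList_join, hnl,
      pv_infix_join (hws w hwmem).1 (hws w hwmem).2]
    exact ⟨q.toList, List.mem_map_of_mem hq, (PySem.Str.isIn_iff_infix _ _).mp hin⟩

-- ===== VERDICT (by name: the statement is the Claim_ definition above) =====
theorem analyze_user_preferences_py_spec : Claim_equal_analyze_user_preferences_py := by
  intro history _
  unfold Spec_analyze_user_preferences_py analyze_user_preferences_py analyze_user_preferences_py_alt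
  simp only []
  rw [pv_foldA,
    pv_group_eq pvConciseWords (by decide), pv_group_eq pvDetailedWords (by decide),
    pv_group_eq pvExampleWords (by decide), pv_group_eq pvFormalWords (by decide)]
  simp [List.any_map, pvQ, Function.comp_def]
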